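-- pv_equiv track=rewrite | github.com/MatKanda/ADS | LCS.py | correct_text_1
-- ===== SOURCE A (Python) =====
-- def longest_common_substring(x, y):
--     m = len(x)
--     n = len(y)
--     table = [[0 for i in range(n + 1)] for j in range(m + 1)]
--     result = 0
--
--     for i in range(m + 1):
--         for j in range(n + 1):
--             if (i == 0 or j == 0):
--                 table[i][j] = 0
--             elif (x[i - 1] == y[j - 1]):
--                 table[i][j] = table[i - 1][j - 1] + 1
--                 result = max(result, table[i][j])
--             else:
--                 table[i][j] = 0
--     return result
--
-- def longest_common_subsequence(x, y):
--     m = len(x)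
--     n = len(y)
--     table = [[0 for i in range(n + 1)] for j in range(m + 1)]
--     for i in range(m + 1):
--         for j in range(n + 1):
--             if i == 0 or j == 0:
--                 table[i][j] = 0
--             elif x[i - 1] == y[j - 1]:
--                 table[i][j] = table[i - 1][j - 1] + 1
--             else:
--                 table[i][j] = max(table[i - 1][j], table[i][j - 1])
--
--     return table[m][n]
--
-- def correct_text_1(input, dictionary, is_subsequence: bool):
--     maximum = 0
--     correct_word = None
--     data = []
--
--     for word in input:
--         word = word.lower()
--         if word in dictionary:
--             data.append(word)
--             continue
--         for dct in dictionary: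
--             if is_subsequence:
--                 lcs = longest_common_subsequence(word, dct)
--             else:
--                 lcs = longest_common_substring(word, dct)
--             if lcs > maximum:
--                 correct_word = dct
--                 maximum = lcs
--             if maximum == len(word):
--                 break
--         data.append(correct_word)
--         maximum = 0
--
--     return data
-- ===== SOURCE B (Python) =====
-- def _suffix_len(x, y, i, j, memo):
--     # length of the common run ending at x[i-1], y[j-1] (top-down, memoized)
--     if i == 0 or j == 0:
--         return 0
--     if (i, j) in memo:
--         return memo[(i, j)]
--     v = _suffix_len(x, y, i - 1, j - 1, memo) + 1 if x[i - 1] == y[j - 1] else 0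
--     memo[(i, j)] = v
--     return v
--
--
-- def longest_common_substring(x, y):
--     memo = {}
--     best = 0
--     for i in range(1, len(x) + 1):
--         for j in range(1, len(y) + 1):
--             best = max(best, _suffix_len(x, y, i, j, memo))
--     return best
--
--
-- def _lcs_rec(x, y, i, j, memo):
--     # classic LCS recurrence, top-down with memoization
--     if i == 0 or j == 0:
--         return 0
--     if (i, j) in memo:
--         return memo[(i, j)]
--     if x[i - 1] == y[j - 1]:
--         v = _lcs_rec(x, y, i - 1, j - 1, memo) + 1
--     else:
--         v = max(_lcs_rec(x, y, i - 1, j, memo), _lcs_rec(x, y, i, j - 1, memo))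
--     memo[(i, j)] = v
--     return v
--
--
-- def longest_common_subsequence(x, y):
--     return _lcs_rec(x, y, len(x), len(y), {})
--
--
-- def correct_text_1(input, dictionary, is_subsequence: bool):
--     maximum = 0
--     correct_word = None
--     data = []
--
--     for word in input:
--         word = word.lower()
--         if word in dictionary:
--             data.append(word)
--             continue
--         for dct in dictionary:
--             if is_subsequence:
--                 lcs = longest_common_subsequence(word, dct)
--             else:
--                 lcs = longest_common_substring(word, dct)
--             if lcs > maximum:
--                 correct_word = dct
--                 maximum = lcs
--             if maximum == len(word):
--                 break
--         data.append(correct_word)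
--         maximum = 0
--
--     return data
-- ===== Notes on version B (the rewrite author's own statement) =====
-- stated objective: alternative
-- what changed: Both LCS helpers are rewritten as top-down memoized recursion (subsequence: the classic rec(i,j) recurrence; substring: a memoized suffix-run-length function maximized over all cell pairs) instead of A's bottom-up (m+1)x(n+1) tables; the entry loop with its tie-breaking and never-reset correct_word is reproduced exactly.
import Mathlib
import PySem

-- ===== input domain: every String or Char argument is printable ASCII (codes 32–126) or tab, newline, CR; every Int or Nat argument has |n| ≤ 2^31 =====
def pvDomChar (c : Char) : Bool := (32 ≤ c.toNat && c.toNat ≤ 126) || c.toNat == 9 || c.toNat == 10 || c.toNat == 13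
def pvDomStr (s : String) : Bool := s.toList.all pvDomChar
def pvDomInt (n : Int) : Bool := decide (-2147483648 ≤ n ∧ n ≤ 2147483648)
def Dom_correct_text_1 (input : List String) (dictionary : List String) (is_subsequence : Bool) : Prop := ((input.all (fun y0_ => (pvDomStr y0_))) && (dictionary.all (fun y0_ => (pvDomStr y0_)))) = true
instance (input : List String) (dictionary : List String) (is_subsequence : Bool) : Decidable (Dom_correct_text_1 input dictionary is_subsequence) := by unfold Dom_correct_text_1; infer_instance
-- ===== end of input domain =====

-- B replaces A's bottom-up DP tables in both LCS helpers with top-down recursion on (i,j)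
-- (the memo dict in Source B caches exactly the values of that recursion); the entry-function
-- loop, its tie-breaking and its never-reset correct_word are reproduced exactly.

-- ===== PORT A =====
-- table[i][j] := v  /  table[i][j]  (Python's 2-d list emulated on List (List Int))
def pvSet2 (t : List (List Int)) (i j : Nat) (v : Int) : List (List Int) :=
  t.set i ((t.getD i []).set j v)
def pvGet2 (t : List (List Int)) (i j : Nat) : Int := (t.getD i []).getD j 0

-- body of the double loop of longest_common_subsequence (branches in source order)
def pvSeqStep (x y : List Char) (i : Nat) (t : List (List Int)) (j : Nat) : List (List Int) :=
  if i = 0 ∨ j = 0 then pvSet2 t i j 0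
  else if x.getD (i-1) ' ' = y.getD (j-1) ' ' then pvSet2 t i j (pvGet2 t (i-1) (j-1) + 1)
  else pvSet2 t i j (max (pvGet2 t (i-1) j) (pvGet2 t i (j-1)))

-- one pass of the inner 'for j in range(n + 1)' loop
def pvSeqRow (x y : List Char) (t : List (List Int)) (i : Nat) : List (List Int) :=
  (List.range (y.length + 1)).foldl (pvSeqStep x y i) t

-- longest_common_subsequence: build the (m+1)x(n+1) table, return table[m][n]
def pvLCSeqA (x y : List Char) : Int :=
  let m := x.length
  let n := y.length
  let table := (List.range (m + 1)).foldl (pvSeqRow x y)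
    (List.replicate (m + 1) (List.replicate (n + 1) (0 : Int)))
  pvGet2 table m n

-- body of the double loop of longest_common_substring; state = (table, result)
def pvSubStep (x y : List Char) (i : Nat) (s : List (List Int) × Int) (j : Nat) :
    List (List Int) × Int :=
  if i = 0 ∨ j = 0 then (pvSet2 s.1 i j 0, s.2)
  else if x.getD (i-1) ' ' = y.getD (j-1) ' ' then
    let v := pvGet2 s.1 (i-1) (j-1) + 1
    (pvSet2 s.1 i j v, max s.2 v)
  else (pvSet2 s.1 i j 0, s.2)

-- one pass of its inner 'for j in range(n + 1)' loop
def pvSubRow (x y : List Char) (s : List (List Int) × Int) (i : Nat) : List (List Int) × Int :=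
  (List.range (y.length + 1)).foldl (pvSubStep x y i) s

-- longest_common_substring: fill the table while maximizing result
def pvLCSubstrA (x y : List Char) : Int :=
  let m := x.length
  let n := y.length
  ((List.range (m + 1)).foldl (pvSubRow x y)
    ((List.replicate (m + 1) (List.replicate (n + 1) (0 : Int))), 0)).2

-- inner 'for dct in dictionary' loop with its break at maximum == len(word)
def pvInnerA (word : List Char) (is_sub : Bool) (dicts : List String) (maximum : Int)
    (cw : Option String) : Int × Option String :=
  match dicts with
  | [] => (maximum, cw)
  | d :: rest =>
    let lcs := if is_sub then pvLCSeqA word d.toList else pvLCSubstrA word d.toList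
    let p := if lcs > maximum then (lcs, some d) else (maximum, cw)
    if p.1 = (word.length : Int) then p else pvInnerA word is_sub rest p.1 p.2

-- outer 'for word in input' loop; correct_word is threaded (never reset), maximum reset to 0
def pvOuterA (input : List String) (dictionary : List String) (is_sub : Bool) (maximum : Int)
    (cw : Option String) (data : List (Option String)) : List (Option String) :=
  match input with
  | [] => data
  | w :: rest =>
    let word := PySem.Str.lower w
    if dictionary.contains word then
      pvOuterA rest dictionary is_sub maximum cw (data ++ [some word])
    else
      let p := pvInnerA word.toList is_sub dictionary maximum cw
      pvOuterA rest dictionary is_sub 0 p.2 (data ++ [p.2])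

def correct_text_1 (input : List String) (dictionary : List String) (is_subsequence : Bool) :
    List (Option String) :=
  pvOuterA input dictionary is_subsequence 0 none []

-- ===== PORT B =====
-- Source B's _lcs_rec: top-down recursion (its memo dict caches exactly these values)
def pvLCSeqRec (x y : List Char) : Nat → Nat → Int
  | 0, _ => 0
  | _+1, 0 => 0
  | i+1, j+1 =>
    if x.getD i ' ' = y.getD j ' ' then pvLCSeqRec x y i j + 1
    else max (pvLCSeqRec x y i (j+1)) (pvLCSeqRec x y (i+1) j)
def pvLCSeqB (x y : List Char) : Int := pvLCSeqRec x y x.length y.length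

-- Source B's _suffix_len: length of the common run ending at x[i-1], y[j-1]
def pvSufB (x y : List Char) : Nat → Nat → Int
  | 0, _ => 0
  | _+1, 0 => 0
  | i+1, j+1 => if x.getD i ' ' = y.getD j ' ' then pvSufB x y i j + 1 else 0

-- max of _suffix_len over i in 1..m, j in 1..n
def pvLCSubstrB (x y : List Char) : Int :=
  (List.range x.length).foldl (fun b i =>
    (List.range y.length).foldl (fun b j => max b (pvSufB x y (i+1) (j+1))) b) 0

def pvInnerB (word : List Char) (is_sub : Bool) (dicts : List String) (maximum : Int)
    (cw : Option String) : Int × Option String :=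
  match dicts with
  | [] => (maximum, cw)
  | d :: rest =>
    let lcs := if is_sub then pvLCSeqB word d.toList else pvLCSubstrB word d.toList
    let p := if lcs > maximum then (lcs, some d) else (maximum, cw)
    if p.1 = (word.length : Int) then p else pvInnerB word is_sub rest p.1 p.2

def pvOuterB (input : List String) (dictionary : List String) (is_sub : Bool) (maximum : Int)
    (cw : Option String) (data : List (Option String)) : List (Option String) :=
  match input with
  | [] => data
  | w :: rest =>
    let word := PySem.Str.lower w
    if dictionary.contains word then
      pvOuterB rest dictionary is_sub maximum cw (data ++ [some word])
    else
      let p := pvInnerB word.toList is_sub dictionary maximum cw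
      pvOuterB rest dictionary is_sub 0 p.2 (data ++ [p.2])

def correct_text_1_alt (input : List String) (dictionary : List String) (is_subsequence : Bool) :
    List (Option String) :=
  pvOuterB input dictionary is_subsequence 0 none []

-- ===== PRECONDITION & SPEC =====
def Spec_correct_text_1 (input : List String) (dictionary : List String) (is_subsequence : Bool) (out : List (Option String)) : Prop := out = correct_text_1_alt input dictionary is_subsequence
instance (input : List String) (dictionary : List String) (is_subsequence : Bool) (out : List (Option String)) : Decidable (Spec_correct_text_1 input dictionary is_subsequence out) := by unfold Spec_correct_text_1; infer_instance

-- ===== CLAIM (what is proved, stated in full; the proofs are below) =====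
def Claim_equal_correct_text_1 : Prop := ∀ (input : List String) (dictionary : List String) (is_subsequence : Bool), Dom_correct_text_1 input dictionary is_subsequence → Spec_correct_text_1 input dictionary is_subsequence (correct_text_1 input dictionary is_subsequence)

-- ===== LEMMAS AND PROOFS =====

-- shape invariant of the DP table: m+1 rows of length n+1 each
def pvShape (t : List (List Int)) (m n : Nat) : Prop :=
  t.length = m + 1 ∧ ∀ r < m + 1, (t.getD r []).length = n + 1
theorem pvGet2_set2_ne (t : List (List Int)) (i j r c : Nat) (v : Int)
    (h : r ≠ i ∨ c ≠ j) : pvGet2 (pvSet2 t i j v) r c = pvGet2 t r c := by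
  by_cases hr : r = i
  · subst hr
    have hc : c ≠ j := by tauto
    by_cases hlt : r < t.length
    · simp [pvGet2, pvSet2, List.getD_eq_getElem?_getD, List.getElem?_set_self hlt,
        List.getElem?_set_ne (Ne.symm hc)]
    · simp [pvGet2, pvSet2, List.set_eq_of_length_le (Nat.le_of_not_lt hlt)]
  · simp [pvGet2, pvSet2, List.getD_eq_getElem?_getD, List.getElem?_set_ne (Ne.symm hr)]
theorem pvGet2_set2_self (t : List (List Int)) (i j : Nat) (v : Int)
    (hi : i < t.length) (hj : j < (t.getD i []).length) :
    pvGet2 (pvSet2 t i j v) i j = v := by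
  have hj' : j < (t[i]?.getD []).length := by simpa [List.getD_eq_getElem?_getD] using hj
  simp [pvGet2, pvSet2, List.getD_eq_getElem?_getD, List.getElem?_set_self hi,
    List.getElem?_set_self hj']
theorem pvShape_set2 {t : List (List Int)} {m n : Nat} (hs : pvShape t m n)
    (i j : Nat) (v : Int) : pvShape (pvSet2 t i j v) m n := by
  obtain ⟨h1, h2⟩ := hs
  refine ⟨by simp [pvSet2, h1], fun r hr => ?_⟩
  by_cases hri : r = i
  · subst hri
    by_cases hlt : r < t.length
    · have := h2 r hr
      simp only [List.getD_eq_getElem?_getD] at this ⊢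
      simp [pvSet2, List.getElem?_set_self hlt, this]
    · simp only [pvSet2, List.set_eq_of_length_le (Nat.le_of_not_lt hlt)]
      exact h2 r hr
  · simp only [pvSet2, List.getD_eq_getElem?_getD, List.getElem?_set_ne (Ne.symm hri)]
    simpa [List.getD_eq_getElem?_getD] using h2 r hr
theorem pvSet2_write {m n : Nat} {t : List (List Int)} (hs : pvShape t m n)
    (i j : Nat) (hi : i < m + 1) (hj : j < n + 1) (v : Int) (W : Nat → Nat → Int)
    (hv : v = W i j) (hrow : ∀ c < j, pvGet2 t i c = W i c) :
    pvShape (pvSet2 t i j v) m n ∧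
    (∀ r c, r ≠ i → pvGet2 (pvSet2 t i j v) r c = pvGet2 t r c) ∧
    (∀ c < j + 1, pvGet2 (pvSet2 t i j v) i c = W i c) := by
  refine ⟨pvShape_set2 hs i j v, fun r c hr => pvGet2_set2_ne t i j r c v (Or.inl hr),
    fun c hc => ?_⟩
  rcases Nat.lt_succ_iff_lt_or_eq.mp hc with h | h
  · rw [pvGet2_set2_ne t i j i c v (Or.inr (Nat.ne_of_lt h)), hrow c h]
  · subst h
    rw [pvGet2_set2_self t i c v (hs.1 ▸ hi) ((hs.2 i hi) ▸ hj), hv]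

-- each written cell of A's subsequence table equals B's recursion at that cell
theorem pvSeqStep_correct (x y : List Char) (i j : Nat) (hi : i ≤ x.length) (hj : j ≤ y.length)
    (t : List (List Int)) (hs : pvShape t x.length y.length)
    (hprev : ∀ c ≤ y.length, 0 < i → pvGet2 t (i-1) c = pvLCSeqRec x y (i-1) c)
    (hrow : ∀ c < j, pvGet2 t i c = pvLCSeqRec x y i c) :
    pvShape (pvSeqStep x y i t j) x.length y.length ∧
    (∀ r c, r ≠ i → pvGet2 (pvSeqStep x y i t j) r c = pvGet2 t r c) ∧
    (∀ c < j + 1, pvGet2 (pvSeqStep x y i t j) i c = pvLCSeqRec x y i c) := by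
  have hi1 : i < x.length + 1 := Nat.lt_succ_of_le hi
  have hj1 : j < y.length + 1 := Nat.lt_succ_of_le hj
  unfold pvSeqStep
  by_cases h0 : i = 0 ∨ j = 0
  · rw [if_pos h0]
    refine pvSet2_write hs i j hi1 hj1 0 (pvLCSeqRec x y) ?_ hrow
    rcases h0 with h | h <;> subst h
    · simp [pvLCSeqRec]
    · cases i <;> simp [pvLCSeqRec]
  · push_neg at h0
    obtain ⟨hi0, hj0⟩ := h0
    obtain ⟨i', rfl⟩ := Nat.exists_eq_succ_of_ne_zero hi0
    obtain ⟨j', rfl⟩ := Nat.exists_eq_succ_of_ne_zero hj0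
    rw [if_neg (by simp)]
    by_cases hm : x.getD (i'+1-1) ' ' = y.getD (j'+1-1) ' '
    · rw [if_pos hm]
      refine pvSet2_write hs _ _ hi1 hj1 _ (pvLCSeqRec x y) ?_ hrow
      have hp := hprev j' (by omega) (by omega)
      simp only [Nat.add_sub_cancel, Nat.succ_sub_one] at hm hp ⊢
      rw [hp]
      show pvLCSeqRec x y i' j' + 1 = pvLCSeqRec x y (i'+1) (j'+1)
      simp only [pvLCSeqRec]
      rw [if_pos hm]
    · rw [if_neg hm]
      refine pvSet2_write hs _ _ hi1 hj1 _ (pvLCSeqRec x y) ?_ hrow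
      have hp1 := hprev (j'+1) (by omega) (by omega)
      have hp2 := hrow j' (by omega)
      simp only [Nat.add_sub_cancel, Nat.succ_sub_one] at hm hp1 hp2 ⊢
      rw [hp1, hp2]
      show max (pvLCSeqRec x y i' (j'+1)) (pvLCSeqRec x y (i'+1) j') = pvLCSeqRec x y (i'+1) (j'+1)
      simp only [pvLCSeqRec]
      rw [if_neg hm]
theorem pvSeqRow_go (x y : List Char) (i : Nat) (hi : i ≤ x.length) (c : Nat) :
    ∀ k, k + c = y.length + 1 →
    ∀ t, pvShape t x.length y.length →
    (∀ cc ≤ y.length, 0 < i → pvGet2 t (i-1) cc = pvLCSeqRec x y (i-1) cc) →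
    (∀ cc < k, pvGet2 t i cc = pvLCSeqRec x y i cc) →
    pvShape ((List.range' k c).foldl (pvSeqStep x y i) t) x.length y.length ∧
    (∀ r cc, r ≠ i → pvGet2 ((List.range' k c).foldl (pvSeqStep x y i) t) r cc = pvGet2 t r cc) ∧
    (∀ cc < k + c, pvGet2 ((List.range' k c).foldl (pvSeqStep x y i) t) i cc = pvLCSeqRec x y i cc) := by
  induction c with
  | zero =>
    intro k hk t hs hprev hrow
    simp only [List.range'_zero, List.foldl_nil]
    exact ⟨hs, fun _ _ _ => trivial, fun cc hcc => hrow cc (by omega)⟩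
  | succ c ih =>
    intro k hk t hs hprev hrow
    rw [List.range'_succ, List.foldl_cons]
    have hjk : k ≤ y.length := by omega
    obtain ⟨s1, s2, s3⟩ := pvSeqStep_correct x y i k hi hjk t hs hprev hrow
    obtain ⟨r1, r2, r3⟩ := ih (k+1) (by omega) _ s1
      (fun cc hcc hpos => by rw [s2 _ _ (by omega), hprev cc hcc hpos])
      (fun cc hcc => s3 cc hcc)
    refine ⟨r1, fun r cc hr => by rw [r2 r cc hr, s2 r cc hr], fun cc hcc => r3 cc (by omega)⟩
theorem pvSeqRow_correct (x y : List Char) (i : Nat) (hi : i ≤ x.length)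
    (t : List (List Int)) (hs : pvShape t x.length y.length)
    (hprev : ∀ cc ≤ y.length, 0 < i → pvGet2 t (i-1) cc = pvLCSeqRec x y (i-1) cc) :
    pvShape (pvSeqRow x y t i) x.length y.length ∧
    (∀ cc ≤ y.length, pvGet2 (pvSeqRow x y t i) i cc = pvLCSeqRec x y i cc) := by
  obtain ⟨r1, _, r3⟩ := pvSeqRow_go x y i hi (y.length + 1) 0 (by omega) t hs hprev (by omega)
  rw [pvSeqRow, List.range_eq_range']
  exact ⟨r1, fun cc hcc => r3 cc (by omega)⟩
theorem pvSeq_outer_go (x y : List Char) (c : Nat) :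
    ∀ k, k + c = x.length + 1 →
    ∀ t, pvShape t x.length y.length →
    (0 < k → ∀ cc ≤ y.length, pvGet2 t (k-1) cc = pvLCSeqRec x y (k-1) cc) →
    pvShape ((List.range' k c).foldl (pvSeqRow x y) t) x.length y.length ∧
    (0 < k + c → ∀ cc ≤ y.length,
      pvGet2 ((List.range' k c).foldl (pvSeqRow x y) t) (k+c-1) cc = pvLCSeqRec x y (k+c-1) cc) := by
  induction c with
  | zero =>
    intro k hk t hs hprev
    simp only [List.range'_zero, List.foldl_nil, Nat.add_zero]
    exact ⟨hs, hprev⟩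
  | succ c ih =>
    intro k hk t hs hprev
    rw [List.range'_succ, List.foldl_cons]
    have hk' : k ≤ x.length := by omega
    obtain ⟨s1, s3⟩ := pvSeqRow_correct x y k hk' t hs (fun cc hcc hpos => hprev hpos cc hcc)
    obtain ⟨r1, r2⟩ := ih (k+1) (by omega) _ s1 (fun _ cc hcc => by simpa using s3 cc hcc)
    refine ⟨r1, fun _ cc hcc => ?_⟩
    have := r2 (by omega) cc hcc
    simpa [show (k+1)+c-1 = k+(c+1)-1 by omega] using this
theorem pvLCSeqA_eq (x y : List Char) : pvLCSeqA x y = pvLCSeqB x y := by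
  have hshape : pvShape (List.replicate (x.length + 1) (List.replicate (y.length + 1) (0 : Int)))
      x.length y.length := by
    refine ⟨by simp, fun r hr => ?_⟩
    simp [List.getD_eq_getElem?_getD, List.getElem?_replicate, hr]
  obtain ⟨_, h⟩ := pvSeq_outer_go x y (x.length + 1) 0 (by omega) _ hshape (by omega)
  have h2 := h (by omega) y.length (by omega)
  rw [pvLCSeqA, pvLCSeqB]
  rw [List.range_eq_range']
  simpa using h2

-- the substring table: every written cell equals _suffix_len, and result accumulates row maxima
def pvRowMax (S : Nat → Nat → Int) (i : Nat) (js : List Nat) (b : Int) : Int :=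
  js.foldl (fun b j => if i = 0 ∨ j = 0 then b else max b (S i j)) b
theorem pvSufB_nonneg (x y : List Char) (i j : Nat) : 0 ≤ pvSufB x y i j := by
  induction i generalizing j with
  | zero => simp [pvSufB]
  | succ i ih =>
    cases j with
    | zero => simp [pvSufB]
    | succ j =>
      simp only [pvSufB]
      split_ifs
      · have := ih j; omega
      · omega
theorem pvSubStep_correct (x y : List Char) (i j : Nat) (hi : i ≤ x.length) (hj : j ≤ y.length)
    (t : List (List Int)) (res : Int) (hs : pvShape t x.length y.length) (hres : 0 ≤ res)
    (hprev : ∀ c ≤ y.length, 0 < i → pvGet2 t (i-1) c = pvSufB x y (i-1) c)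
    (hrow : ∀ c < j, pvGet2 t i c = pvSufB x y i c) :
    pvShape (pvSubStep x y i (t, res) j).1 x.length y.length ∧
    (∀ r c, r ≠ i → pvGet2 (pvSubStep x y i (t, res) j).1 r c = pvGet2 t r c) ∧
    (∀ c < j + 1, pvGet2 (pvSubStep x y i (t, res) j).1 i c = pvSufB x y i c) ∧
    (pvSubStep x y i (t, res) j).2 = (if i = 0 ∨ j = 0 then res else max res (pvSufB x y i j)) ∧
    0 ≤ (pvSubStep x y i (t, res) j).2 := by
  have hi1 : i < x.length + 1 := Nat.lt_succ_of_le hi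
  have hj1 : j < y.length + 1 := Nat.lt_succ_of_le hj
  unfold pvSubStep
  by_cases h0 : i = 0 ∨ j = 0
  · rw [if_pos h0]
    obtain ⟨a1, a2, a3⟩ := pvSet2_write hs i j hi1 hj1 0 (pvSufB x y)
      (by rcases h0 with h | h <;> subst h
          · simp [pvSufB]
          · cases i <;> simp [pvSufB]) hrow
    exact ⟨a1, a2, a3, by rw [if_pos h0], hres⟩
  · push_neg at h0
    obtain ⟨hi0, hj0⟩ := h0
    obtain ⟨i', rfl⟩ := Nat.exists_eq_succ_of_ne_zero hi0
    obtain ⟨j', rfl⟩ := Nat.exists_eq_succ_of_ne_zero hj0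
    rw [if_neg (by simp)]
    by_cases hm : x.getD (i'+1-1) ' ' = y.getD (j'+1-1) ' '
    · rw [if_pos hm]
      have hveq : pvGet2 t (i'+1-1) (j'+1-1) + 1 = pvSufB x y (i'+1) (j'+1) := by
        have hp := hprev j' (by omega) (by omega)
        simp only [Nat.succ_sub_one, Nat.add_sub_cancel] at hm hp ⊢
        rw [hp]
        simp only [pvSufB]
        rw [if_pos hm]
      obtain ⟨a1, a2, a3⟩ := pvSet2_write hs _ _ hi1 hj1 _ (pvSufB x y) hveq hrow
      refine ⟨a1, a2, a3, ?_, ?_⟩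
      · simp only [if_neg (by simp : ¬(i'+1 = 0 ∨ j'+1 = 0))]
        rw [hveq]
      · have := pvSufB_nonneg x y (i'+1) (j'+1)
        rw [hveq]
        exact le_max_of_le_right this
    · rw [if_neg hm]
      have hz : (0 : Int) = pvSufB x y (i'+1) (j'+1) := by
        simp only [Nat.succ_sub_one, Nat.add_sub_cancel] at hm
        simp only [pvSufB]
        rw [if_neg hm]
      obtain ⟨a1, a2, a3⟩ := pvSet2_write hs _ _ hi1 hj1 _ (pvSufB x y) hz hrow
      refine ⟨a1, a2, a3, ?_, hres⟩
      simp only [if_neg (by simp : ¬(i'+1 = 0 ∨ j'+1 = 0))]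
      rw [← hz]
      omega
theorem pvSubRow_go (x y : List Char) (i : Nat) (hi : i ≤ x.length) (c : Nat) :
    ∀ k, k + c = y.length + 1 →
    ∀ t res, pvShape t x.length y.length → 0 ≤ res →
    (∀ cc ≤ y.length, 0 < i → pvGet2 t (i-1) cc = pvSufB x y (i-1) cc) →
    (∀ cc < k, pvGet2 t i cc = pvSufB x y i cc) →
    pvShape ((List.range' k c).foldl (pvSubStep x y i) (t, res)).1 x.length y.length ∧
    (∀ r cc, r ≠ i → pvGet2 ((List.range' k c).foldl (pvSubStep x y i) (t, res)).1 r cc = pvGet2 t r cc) ∧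
    (∀ cc < k + c, pvGet2 ((List.range' k c).foldl (pvSubStep x y i) (t, res)).1 i cc = pvSufB x y i cc) ∧
    ((List.range' k c).foldl (pvSubStep x y i) (t, res)).2 = pvRowMax (pvSufB x y) i (List.range' k c) res ∧
    0 ≤ ((List.range' k c).foldl (pvSubStep x y i) (t, res)).2 := by
  induction c with
  | zero =>
    intro k hk t res hs hres hprev hrow
    simp only [List.range'_zero, List.foldl_nil, Nat.add_zero, pvRowMax]
    exact ⟨hs, fun _ _ _ => trivial, fun cc hcc => hrow cc (by omega), trivial, hres⟩
  | succ c ih =>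
    intro k hk t res hs hres hprev hrow
    rw [List.range'_succ, List.foldl_cons]
    have hjk : k ≤ y.length := by omega
    obtain ⟨s1, s2, s3, s4, s5⟩ := pvSubStep_correct x y i k hi hjk t res hs hres hprev hrow
    have hstep : pvSubStep x y i (t, res) k =
        ((pvSubStep x y i (t, res) k).1, (pvSubStep x y i (t, res) k).2) := rfl
    rw [hstep]
    obtain ⟨r1, r2, r3, r4, r5⟩ := ih (k+1) (by omega) _ _ s1 s5
      (fun cc hcc hpos => by rw [s2 _ _ (by omega), hprev cc hcc hpos])
      (fun cc hcc => s3 cc hcc)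
    refine ⟨r1, fun r cc hr => by rw [r2 r cc hr, s2 r cc hr],
      fun cc hcc => r3 cc (by omega), ?_, r5⟩
    rw [r4, s4]
    simp only [pvRowMax, List.foldl_cons]
theorem pvSub_outer_go (x y : List Char) (c : Nat) :
    ∀ k, k + c = x.length + 1 →
    ∀ t res, pvShape t x.length y.length → 0 ≤ res →
    (0 < k → ∀ cc ≤ y.length, pvGet2 t (k-1) cc = pvSufB x y (k-1) cc) →
    pvShape ((List.range' k c).foldl (pvSubRow x y) (t, res)).1 x.length y.length ∧
    (0 < k + c → ∀ cc ≤ y.length,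
      pvGet2 ((List.range' k c).foldl (pvSubRow x y) (t, res)).1 (k+c-1) cc = pvSufB x y (k+c-1) cc) ∧
    ((List.range' k c).foldl (pvSubRow x y) (t, res)).2 =
      (List.range' k c).foldl (fun b i => pvRowMax (pvSufB x y) i (List.range' 0 (y.length + 1)) b) res ∧
    0 ≤ ((List.range' k c).foldl (pvSubRow x y) (t, res)).2 := by
  induction c with
  | zero =>
    intro k hk t res hs hres hprev
    simp only [List.range'_zero, List.foldl_nil, Nat.add_zero]
    exact ⟨hs, hprev, trivial, hres⟩
  | succ c ih =>
    intro k hk t res hs hres hprev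
    rw [List.range'_succ, List.foldl_cons]
    have hk' : k ≤ x.length := by omega
    have hrow := pvSubRow_go x y k hk' (y.length + 1) 0 (by omega) t res hs hres
      (fun cc hcc hpos => hprev hpos cc hcc) (by omega)
    have hsr : pvSubRow x y (t, res) k =
        (List.range' 0 (y.length + 1)).foldl (pvSubStep x y k) (t, res) := by
      rw [pvSubRow, List.range_eq_range']
    rw [hsr]
    obtain ⟨s1, _, s3, s4, s5⟩ := hrow
    have hsplit : (List.range' 0 (y.length + 1)).foldl (pvSubStep x y k) (t, res) =
        (((List.range' 0 (y.length + 1)).foldl (pvSubStep x y k) (t, res)).1,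
         ((List.range' 0 (y.length + 1)).foldl (pvSubStep x y k) (t, res)).2) := rfl
    rw [hsplit]
    obtain ⟨r1, r2, r3, r4⟩ := ih (k+1) (by omega) _ _ s1 s5
      (fun _ cc hcc => by simpa using s3 cc (by omega))
    refine ⟨r1, fun _ cc hcc => ?_, ?_, r4⟩
    · have := r2 (by omega) cc hcc
      simpa [show (k+1)+c-1 = k+(c+1)-1 by omega] using this
    · rw [r3, s4, List.foldl_cons]
theorem pvRowMax_zero (S : Nat → Nat → Int) (js : List Nat) (b : Int) :
    pvRowMax S 0 js b = b := by
  induction js generalizing b with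
  | nil => rfl
  | cons j js ih =>
    simp only [pvRowMax, List.foldl_cons, true_or, if_true] at ih ⊢
    exact ih b
theorem pvRowMax_succ (S : Nat → Nat → Int) (i n : Nat) (b : Int) :
    pvRowMax S (i+1) (List.range (n+1)) b =
      (List.range n).foldl (fun b j => max b (S (i+1) (j+1))) b := by
  rw [List.range_succ_eq_map]
  simp [pvRowMax, List.foldl_map]
theorem pvFoldl_ext {α β : Type} (f g : β → α → β) (h : ∀ b a, f b a = g b a) :
    ∀ (l : List α) (b : β), l.foldl f b = l.foldl g b := by
  intro l
  induction l with
  | nil => intro b; rfl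
  | cons a l ih => intro b; simp only [List.foldl_cons, h]; exact ih _
theorem pvLCSubstrA_eq (x y : List Char) : pvLCSubstrA x y = pvLCSubstrB x y := by
  have hshape : pvShape (List.replicate (x.length + 1) (List.replicate (y.length + 1) (0 : Int)))
      x.length y.length := by
    refine ⟨by simp, fun r hr => ?_⟩
    simp [List.getD_eq_getElem?_getD, hr]
  obtain ⟨_, _, h3, _⟩ := pvSub_outer_go x y (x.length + 1) 0 (by omega) _ 0 hshape (by omega)
    (by omega)
  rw [pvLCSubstrA, List.range_eq_range', h3]
  rw [show List.range' 0 (x.length + 1) = List.range (x.length + 1) from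
    List.range_eq_range'.symm]
  rw [List.range_succ_eq_map, List.foldl_cons, pvRowMax_zero, List.foldl_map, pvLCSubstrB]
  apply pvFoldl_ext
  intro b i
  rw [show List.range' 0 (y.length + 1) = List.range (y.length + 1) from
    List.range_eq_range'.symm]
  simpa using pvRowMax_succ (pvSufB x y) i y.length b

theorem pvInnerA_eq (word : List Char) (is_sub : Bool) (dicts : List String) (maximum : Int)
    (cw : Option String) :
    pvInnerA word is_sub dicts maximum cw = pvInnerB word is_sub dicts maximum cw := by
  induction dicts generalizing maximum cw with
  | nil => rfl
  | cons d rest ih =>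
    simp only [pvInnerA, pvInnerB, pvLCSeqA_eq, pvLCSubstrA_eq]
    split_ifs <;> simp [ih]

theorem pvOuterA_eq (input dictionary : List String) (is_sub : Bool) (maximum : Int)
    (cw : Option String) (data : List (Option String)) :
    pvOuterA input dictionary is_sub maximum cw data =
      pvOuterB input dictionary is_sub maximum cw data := by
  induction input generalizing maximum cw data with
  | nil => rfl
  | cons w rest ih =>
    simp only [pvOuterA, pvOuterB, pvInnerA_eq]
    split_ifs <;> simp [ih]

-- ===== VERDICT (by name: the statement is the Claim_ definition above) =====
theorem correct_text_1_spec : Claim_equal_correct_text_1 := by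
  intro input dictionary is_subsequence _
  unfold Spec_correct_text_1 correct_text_1 correct_text_1_alt
  exact pvOuterA_eq ..
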